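-- pv_equiv track=rewrite | github.com/GrafSpiel/GROMARK | gromark_gpu.py | expand_key_and_decrypt
-- ===== SOURCE A (Python) =====
-- import string
--
-- def expand_key_and_decrypt(primer, base, ciphertext, cipher_alphabet=string.ascii_uppercase):
--     """
--     Expand a primer into a key and decrypt the ciphertext.
--
--     Args:
--         primer (list): Primer to expand
--         base (int): The number base to use
--         ciphertext (str): The ciphertext to decrypt
--         cipher_alphabet (str): Ciphertext alphabet
--
--     Returns:
--         str: Decrypted plaintext
--     """
--     # Expand the primer
--     key = []
--     for i in range(len(primer)):
--         key.append(primer[i])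
--
--     while len(key) < len(ciphertext):
--         key.append((key[-1] + key[-2]) % base)
--
--     # Decrypt
--     plaintext = []
--     for i, c in enumerate(ciphertext):
--         if c in cipher_alphabet:
--             idx = cipher_alphabet.index(c)
--             pt_idx = (idx - key[i]) % len(cipher_alphabet)
--             plaintext.append(cipher_alphabet[pt_idx])
--         else:
--             plaintext.append(c)
--
--     return ''.join(plaintext)
-- ===== SOURCE B (Python) =====
-- import string
--
-- def expand_key_and_decrypt(primer, base, ciphertext, cipher_alphabet=string.ascii_uppercase):
--     """Fused single pass: expand the key on the fly with two rolling values and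
--     decrypt each character immediately; no full key list is materialised."""
--     n = len(cipher_alphabet)
--     plen = len(primer)
--     prev2 = prev1 = None
--     out = []
--     for i, c in enumerate(ciphertext):
--         if i < plen:
--             k = primer[i]
--         else:
--             k = (prev1 + prev2) % base
--         prev2, prev1 = prev1, k
--         j = cipher_alphabet.find(c)
--         out.append(cipher_alphabet[(j - k) % n] if j >= 0 else c)
--     return ''.join(out)
-- ===== Notes on version B (the rewrite author's own statement) =====
-- stated objective: alternative
-- what changed: Fused the key-expansion and decryption into a single pass over enumerate(ciphertext) that keeps only two rolling key values (no full key list is materialised) and replaces the double scan 'c in alphabet' + 'alphabet.index(c)' by one 'alphabet.find(c)'.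
import Mathlib
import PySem

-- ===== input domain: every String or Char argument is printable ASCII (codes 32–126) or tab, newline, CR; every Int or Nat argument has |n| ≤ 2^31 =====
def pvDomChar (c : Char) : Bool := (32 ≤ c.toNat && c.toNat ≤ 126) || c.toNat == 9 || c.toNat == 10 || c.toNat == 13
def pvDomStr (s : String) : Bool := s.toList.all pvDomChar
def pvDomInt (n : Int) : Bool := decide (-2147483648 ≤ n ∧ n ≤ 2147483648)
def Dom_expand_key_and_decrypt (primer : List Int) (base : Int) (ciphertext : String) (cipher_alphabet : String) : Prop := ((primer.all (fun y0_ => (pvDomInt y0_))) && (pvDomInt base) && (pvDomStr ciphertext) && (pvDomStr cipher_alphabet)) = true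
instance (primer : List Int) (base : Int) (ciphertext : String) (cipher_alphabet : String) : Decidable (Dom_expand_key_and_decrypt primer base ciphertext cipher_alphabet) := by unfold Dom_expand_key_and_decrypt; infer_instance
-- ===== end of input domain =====

-- B fuses key expansion and decryption into one pass with two rolling key values
-- (no full key list); same return value as A on every input where A returns.

-- ===== PORT A =====
-- the `while len(key) < len(ciphertext)` expansion loop, fuel = len(ciphertext)
-- (each iteration grows the list by one, so this fuel suffices);
-- key[-1] / key[-2] via pyGet? with default 0 (only reached where Python raises,
-- excluded by Pre_)
def pvExpandGo (n : Nat) (base : Int) : List Int → Nat → List Int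
  | key, 0 => key
  | key, fuel+1 =>
    if key.length < n then
      pvExpandGo n base
        (key ++ [PySem.Int.mod (((PySem.List.pyGet? key (-1)).getD 0) +
                                ((PySem.List.pyGet? key (-2)).getD 0)) base]) fuel
    else key

-- body of A's decrypt loop: `if c in cipher_alphabet: … index(c) …` ;
-- `cipher_alphabet.index(c)` is ported as Chars.find (equal to str.index on the
-- guarded branch, where c occurs in cipher_alphabet)
def pvDecChar (alpha : List Char) (k : Int) (c : Char) : Char :=
  if PySem.Chars.isIn [c] alpha = true then
    (PySem.List.pyGet? alpha
       (PySem.Int.mod (PySem.Chars.find alpha [c] - k) (alpha.length : Int))).getD c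
  else c

def expand_key_and_decrypt (primer : List Int) (base : Int) (ciphertext : String) (cipher_alphabet : String) : String :=
  String.mk ((PySem.List.enumerate ciphertext.toList 0).map
    (fun ic => pvDecChar cipher_alphabet.toList
      (PySem.List.pyGetD
        (pvExpandGo ciphertext.toList.length base primer ciphertext.toList.length) ic.1 0)
      ic.2))

-- ===== PORT B =====
-- one step of B's fused loop; state = (prev2, prev1, out); prev None → Option,
-- .getD 0 only reached where Python's None + None raises (excluded by Pre_)
def pvAltStep (primer : List Int) (base : Int) (alpha : List Char)
    (st : Option Int × Option Int × List Char) (ic : Int × Char) :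
    Option Int × Option Int × List Char :=
  let k : Int := if ic.1 < (primer.length : Int) then PySem.List.pyGetD primer ic.1 0
                 else PySem.Int.mod (st.2.1.getD 0 + st.1.getD 0) base
  let j := PySem.Chars.find alpha [ic.2]
  (st.2.1, some k,
    st.2.2 ++ [if 0 ≤ j then
                 (PySem.List.pyGet? alpha (PySem.Int.mod (j - k) (alpha.length : Int))).getD ic.2
               else ic.2])

def expand_key_and_decrypt_alt (primer : List Int) (base : Int) (ciphertext : String) (cipher_alphabet : String) : String :=
  String.mk (((PySem.List.enumerate ciphertext.toList 0).foldl
    (pvAltStep primer base cipher_alphabet.toList) (none, none, ([] : List Char))).2.2)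

-- ===== PRECONDITION & SPEC =====
-- Pre_ excludes exactly the inputs where the Python A raises: when the key must be
-- expanded beyond the primer (len(ciphertext) > len(primer)) A's key[-2] raises
-- IndexError for len(primer) < 2 and `% base` raises ZeroDivisionError for base = 0
-- (B raises there too: TypeError on None / ZeroDivisionError).
def Pre_expand_key_and_decrypt (primer : List Int) (base : Int) (ciphertext : String) (cipher_alphabet : String) : Prop :=
  ciphertext.toList.length ≤ primer.length ∨ (2 ≤ primer.length ∧ base ≠ 0)
instance (primer : List Int) (base : Int) (ciphertext : String) (cipher_alphabet : String) : Decidable (Pre_expand_key_and_decrypt primer base ciphertext cipher_alphabet) := by unfold Pre_expand_key_and_decrypt; infer_instance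
def pvWitness_expand_key_and_decrypt : List Int × Int × String × String := ([1, 2], 10, "HELLO", "ABCDEFGHIJKLMNOPQRSTUVWXYZ")

def Spec_expand_key_and_decrypt (primer : List Int) (base : Int) (ciphertext : String) (cipher_alphabet : String) (out : String) : Prop := out = expand_key_and_decrypt_alt primer base ciphertext cipher_alphabet
instance (primer : List Int) (base : Int) (ciphertext : String) (cipher_alphabet : String) (out : String) : Decidable (Spec_expand_key_and_decrypt primer base ciphertext cipher_alphabet out) := by unfold Spec_expand_key_and_decrypt; infer_instance

-- ===== CLAIM (what is proved, stated in full; the proofs are below) =====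
def Claim_equal_expand_key_and_decrypt : Prop := ∀ (primer : List Int) (base : Int) (ciphertext : String) (cipher_alphabet : String), Dom_expand_key_and_decrypt primer base ciphertext cipher_alphabet → Pre_expand_key_and_decrypt primer base ciphertext cipher_alphabet → Spec_expand_key_and_decrypt primer base ciphertext cipher_alphabet (expand_key_and_decrypt primer base ciphertext cipher_alphabet)

-- ===== LEMMAS AND PROOFS =====

-- per-character equality: B's `find ≥ 0` test and A's `c in alpha` test agree,
-- and on the hit branch both use the same first-occurrence index
theorem pvCharEq (alpha : List Char) (k : Int) (c : Char) :
    (if 0 ≤ PySem.Chars.find alpha [c] then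
       (PySem.List.pyGet? alpha
          (PySem.Int.mod (PySem.Chars.find alpha [c] - k) (alpha.length : Int))).getD c
     else c) = pvDecChar alpha k c := by
  unfold pvDecChar
  by_cases h : [c] <:+: alpha
  · rw [if_pos ((PySem.Chars.find_nonneg_iff alpha [c]).mpr h),
        if_pos ((PySem.Chars.isIn_iff_infix [c] alpha).mpr h)]
  · rw [if_neg (fun h0 => h ((PySem.Chars.find_nonneg_iff alpha [c]).mp h0)),
        if_neg (by simp [(PySem.Chars.isIn_eq_false_iff [c] alpha).mpr h])]

-- the expansion loop only extends the list
theorem pvExpandGo_prefix (n : Nat) (base : Int) :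
    ∀ (fuel : Nat) (key : List Int), key <+: pvExpandGo n base key fuel := by
  intro fuel
  induction fuel with
  | zero => intro key; simp [pvExpandGo]
  | succ f ih =>
    intro key
    unfold pvExpandGo
    split
    · exact List.IsPrefix.trans (List.prefix_append _ _) (ih _)
    · exact List.prefix_refl _

-- with enough fuel the result has length ≥ n
theorem pvExpandGo_len (n : Nat) (base : Int) :
    ∀ (fuel : Nat) (key : List Int), n ≤ key.length + fuel →
      n ≤ (pvExpandGo n base key fuel).length := by
  intro fuel
  induction fuel with
  | zero => intro key h; simpa [pvExpandGo] using h
  | succ f ih =>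
    intro key h
    unfold pvExpandGo
    split
    · exact ih _ (by simp; omega)
    · omega

-- the Fibonacci recurrence (mod base) holds at every index ≥ m of the result,
-- provided it holds at every such index of the start list
theorem pvExpandGo_rec (n : Nat) (base : Int) :
    ∀ (fuel : Nat) (key : List Int), 2 ≤ key.length →
      (∀ m : Nat, m ≤ key.length →
        (∀ i, m ≤ i → i < key.length →
          key.getD i 0 = PySem.Int.mod (key.getD (i-1) 0 + key.getD (i-2) 0) base) →
        (∀ i, m ≤ i → i < (pvExpandGo n base key fuel).length →
          (pvExpandGo n base key fuel).getD i 0 =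
            PySem.Int.mod ((pvExpandGo n base key fuel).getD (i-1) 0 +
                           (pvExpandGo n base key fuel).getD (i-2) 0) base)) := by
  intro fuel
  induction fuel with
  | zero => intro key _ m _ hk i h1 h2; simp only [pvExpandGo] at h2 ⊢; exact hk i h1 h2
  | succ f ih =>
    intro key hlen m hm hk
    unfold pvExpandGo
    split
    · -- appended value v
      set v : Int := PySem.Int.mod (((PySem.List.pyGet? key (-1)).getD 0) +
                                    ((PySem.List.pyGet? key (-2)).getD 0)) base with hv
      have h1 : PySem.List.pyGet? key (-1) = some (key.getD (key.length - 1) 0) := by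
        rw [PySem.List.pyGet?_neg_ofNat key 1 (by omega) (by omega)]
        rw [List.getD_eq_getElem?_getD]
        rw [List.getElem?_eq_getElem (by omega)]
        simp
      have h2 : PySem.List.pyGet? key (-2) = some (key.getD (key.length - 2) 0) := by
        rw [PySem.List.pyGet?_neg_ofNat key 2 (by omega) (by omega)]
        rw [List.getD_eq_getElem?_getD]
        rw [List.getElem?_eq_getElem (by omega)]
        simp
      have hgetD : ∀ i, i < key.length → (key ++ [v]).getD i 0 = key.getD i 0 := by
        intro i hi
        simp [List.getD_eq_getElem?_getD, List.getElem?_append_left hi]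
      have hlast : (key ++ [v]).getD key.length 0 = v := by
        simp [List.getD_eq_getElem?_getD]
      apply ih (key ++ [v]) (by simp; omega) m (by simp; omega)
      intro i hmi hik
      rcases Nat.lt_or_ge i key.length with hlt | hge
      · rw [hgetD i hlt, hgetD (i-1) (by omega), hgetD (i-2) (by omega)]
        exact hk i hmi hlt
      · have hie : i = key.length := by simp at hik; omega
        subst hie
        rw [hlast, hgetD (key.length - 1) (by omega), hgetD (key.length - 2) (by omega)]
        rw [hv, h1, h2]
        simp
    · exact hk

-- the expansion loop does nothing when the list is already long enough
theorem pvExpandGo_of_ge (n : Nat) (base : Int) (fuel : Nat) (key : List Int)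
    (h : n ≤ key.length) : pvExpandGo n base key fuel = key := by
  cases fuel with
  | zero => rfl
  | succ f => unfold pvExpandGo; rw [if_neg (by omega)]

-- main loop invariant: B's fold with rolling (prev2, prev1) reproduces A's map
-- over the expanded key, provided key obeys primer-prefix + recurrence facts
theorem pvLoopEq (primer key : List Int) (base : Int) (alpha : List Char)
    (Hpref : ∀ i, i < primer.length → key.getD i 0 = primer.getD i 0)
    (Hrec : ∀ i, primer.length ≤ i → i < key.length →
      key.getD i 0 = PySem.Int.mod (key.getD (i-1) 0 + key.getD (i-2) 0) base) :
    ∀ (cs : List Char) (s : Nat) (p2 p1 : Option Int) (out : List Char),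
      s + cs.length ≤ key.length →
      (∀ i : Nat, primer.length ≤ i → i < s + cs.length → 2 ≤ i) →
      (1 ≤ s → p1 = some (key.getD (s-1) 0)) →
      (2 ≤ s → p2 = some (key.getD (s-2) 0)) →
      ((PySem.List.enumerate cs (s : Int)).foldl (pvAltStep primer base alpha) (p2, p1, out)).2.2
        = out ++ (PySem.List.enumerate cs (s : Int)).map
            (fun ic => pvDecChar alpha (PySem.List.pyGetD key ic.1 0) ic.2) := by
  intro cs
  induction cs with
  | nil => intro s p2 p1 out _ _ _ _; simp [PySem.List.enumerate_nil]
  | cons c cs ih =>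
    intro s p2 p1 out hlen hge2 hp1 hp2
    rw [PySem.List.enumerate_cons]
    have hk : (if (s : Int) < (primer.length : Int) then primer.getD s 0
               else PySem.Int.mod (p1.getD 0 + p2.getD 0) base) = key.getD s 0 := by
      by_cases hs : s < primer.length
      · rw [if_pos (by exact_mod_cast hs), Hpref s hs]
      · have hsp : primer.length ≤ s := Nat.le_of_not_lt hs
        have hs2 : 2 ≤ s := hge2 s hsp (by simp only [List.length_cons]; omega)
        rw [if_neg (by exact_mod_cast hs)]
        rw [hp1 (by omega), hp2 (by omega)]
        simp only [Option.getD_some]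
        exact (Hrec s hsp (by simp only [List.length_cons] at hlen; omega)).symm
    have hstep : pvAltStep primer base alpha (p2, p1, out) ((s : Int), c)
        = (p1, some (key.getD s 0),
           out ++ [pvDecChar alpha (PySem.List.pyGetD key (s : Int) 0) c]) := by
      unfold pvAltStep
      simp only [pvCharEq, PySem.List.pyGetD_natCast, hk]
    rw [List.foldl_cons, hstep]
    have hs1 : ((s : Int) + 1) = (((s+1 : Nat)) : Int) := by push_cast; ring
    rw [hs1, ih (s+1) p1 (some (key.getD s 0)) _
          (by simp only [List.length_cons] at hlen; omega)
          (by intro i hi hi2; exact hge2 i hi (by simp only [List.length_cons]; omega))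
          (by intro _; simp)
          (by intro h2; rw [hp1 (by omega), show s+1-2 = s-1 from by omega])]
    simp

-- both ports agree, given the key facts
theorem pvMain (primer key : List Int) (base : Int) (ct alpha : List Char)
    (Hpref : ∀ i, i < primer.length → key.getD i 0 = primer.getD i 0)
    (Hrec : ∀ i, primer.length ≤ i → i < key.length →
      key.getD i 0 = PySem.Int.mod (key.getD (i-1) 0 + key.getD (i-2) 0) base)
    (Hlen : ct.length ≤ key.length)
    (Hge2 : ∀ i : Nat, primer.length ≤ i → i < ct.length → 2 ≤ i) :
    ((PySem.List.enumerate ct 0).foldl (pvAltStep primer base alpha) (none, none, ([] : List Char))).2.2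
      = (PySem.List.enumerate ct 0).map
          (fun ic => pvDecChar alpha (PySem.List.pyGetD key ic.1 0) ic.2) := by
  have h := pvLoopEq primer key base alpha Hpref Hrec ct 0 none none []
    (by omega) (by intro i h1 h2; exact Hge2 i h1 (by omega))
    (fun h1 => absurd h1 (by omega)) (fun h1 => absurd h1 (by omega))
  simpa using h

-- ===== VERDICT (by name: the statement is the Claim_ definition above) =====
theorem expand_key_and_decrypt_spec : Claim_equal_expand_key_and_decrypt := by
  intro primer base ciphertext cipher_alphabet _ hpre
  unfold Spec_expand_key_and_decrypt expand_key_and_decrypt expand_key_and_decrypt_alt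
  rcases hpre with hle | ⟨hp2, _⟩
  · -- ciphertext not longer than primer: the expansion loop does nothing
    rw [pvExpandGo_of_ge ciphertext.toList.length base ciphertext.toList.length primer hle]
    exact (congrArg String.mk (pvMain primer primer base ciphertext.toList cipher_alphabet.toList
      (fun i _ => rfl)
      (by intro i h1 h2; exact absurd h1 (by omega))
      hle
      (by intro i h1 h2; omega))).symm
  · -- primer length ≥ 2: use the expansion-loop lemmas
    obtain ⟨t, ht⟩ := pvExpandGo_prefix ciphertext.toList.length base
      ciphertext.toList.length primer
    have hlen : ciphertext.toList.length ≤
        (pvExpandGo ciphertext.toList.length base primer ciphertext.toList.length).length :=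
      pvExpandGo_len ciphertext.toList.length base ciphertext.toList.length primer (by omega)
    have hrec := pvExpandGo_rec ciphertext.toList.length base ciphertext.toList.length primer
      (by omega) primer.length (le_refl _) (by intro i h1 h2; exact absurd h1 (by omega))
    exact (congrArg String.mk (pvMain primer
      (pvExpandGo ciphertext.toList.length base primer ciphertext.toList.length)
      base ciphertext.toList cipher_alphabet.toList
      (by intro i hi; rw [← ht];
          simp [List.getD_eq_getElem?_getD, List.getElem?_append_left hi])
      hrec hlen
      (by intro i h1 _; omega))).symm
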